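-- pv_equiv track=rewrite | github.com/Gayoung03/Coding_test_Python | 프로그래머스/1/87389. 나머지가 1이 되는 수 찾기/나머지가 1이 되는 수 찾기.py | solution
-- ===== SOURCE A (Python) =====
-- def solution(n):
--     answer = 0
--     xlist = []
--     for i in range (1,n):
--         if n%i == 1:
--             xlist.append(i)
--     answer = min(xlist)
--     return answer
-- ===== SOURCE B (Python) =====
-- def solution(n):
--     # smallest i with n % i == 1  ==  smallest divisor >= 2 of n - 1,
--     # found by trial division up to sqrt(n - 1)
--     m = n - 1
--     i = 2
--     while i * i <= m:
--         if m % i == 0: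
--             return i
--         i += 1
--     return m
-- ===== Notes on version B (the rewrite author's own statement) =====
-- stated objective: faster
-- what changed: Instead of scanning all i in [1,n) collecting those with n%i==1 and taking the min, B observes the answer is the smallest divisor >=2 of n-1 and finds it by trial division up to sqrt(n-1).
-- outside the precondition, e.g. on solution(2): A raises ValueError, B returns 1; on solution(1): A raises ValueError, B returns 0
import Mathlib
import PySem

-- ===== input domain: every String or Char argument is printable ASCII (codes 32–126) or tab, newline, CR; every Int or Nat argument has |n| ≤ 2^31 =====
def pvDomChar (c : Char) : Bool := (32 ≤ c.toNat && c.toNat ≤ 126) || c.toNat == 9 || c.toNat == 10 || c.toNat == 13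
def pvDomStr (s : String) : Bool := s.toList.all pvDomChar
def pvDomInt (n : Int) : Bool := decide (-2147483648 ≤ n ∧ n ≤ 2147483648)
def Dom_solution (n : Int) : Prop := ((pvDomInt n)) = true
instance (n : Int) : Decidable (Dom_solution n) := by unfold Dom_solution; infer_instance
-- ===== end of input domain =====

-- B replaces A's O(n) scan (min of all i with n % i == 1) by trial division for the
-- smallest divisor ≥ 2 of n-1, an asymptotically faster O(√n) algorithm.

-- ===== PORT A =====
def solution (n : Int) : Int :=
  -- xlist = [i for i in range(1, n) if n % i == 1]; answer = min(xlist)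
  let xlist := (PySem.List.pyRange 1 n 1).foldl
      (fun acc i => if PySem.Int.mod n i == 1 then acc ++ [i] else acc) []
  -- Python's min raises ValueError on an empty list; Pre_solution excludes that case
  (PySem.List.min? xlist (fun x => x)).getD 0

-- ===== PORT B =====
-- while i * i <= m: if m % i == 0: return i; i += 1; return m
def spfAux (m i : Int) : Int :=
  if h : i * i ≤ m then
    if PySem.Int.mod m i == 0 then i else spfAux m (i + 1)
  else m
termination_by (m + 1 - i).toNat
decreasing_by
  have hii : i ≤ i * i := by nlinarith [mul_self_nonneg (i - 1)]
  omega

def solution_alt (n : Int) : Int := spfAux (n - 1) 2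

-- ===== PRECONDITION & SPEC =====
-- For n ≤ 2 no i in range(1,n) has n % i == 1, so A's min() raises ValueError.
def Pre_solution (n : Int) : Prop := 3 ≤ n
instance (n : Int) : Decidable (Pre_solution n) := by unfold Pre_solution; infer_instance
def pvWitness_solution : Int := (3)

def Spec_solution (n : Int) (out : Int) : Prop := out = solution_alt n
instance (n : Int) (out : Int) : Decidable (Spec_solution n out) := by unfold Spec_solution; infer_instance

-- ===== CLAIM (what is proved, stated in full; the proofs are below) =====
def Claim_equal_solution : Prop := ∀ (n : Int), Dom_solution n → Pre_solution n → Spec_solution n (solution n)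

-- ===== LEMMAS AND PROOFS =====

-- r is the least divisor ≥ 2 of m
def IsLD (m r : Int) : Prop := 2 ≤ r ∧ r ∣ m ∧ ∀ d, 2 ≤ d → d ∣ m → r ≤ d

theorem IsLD_unique {m r1 r2 : Int} (h1 : IsLD m r1) (h2 : IsLD m r2) : r1 = r2 :=
  le_antisymm (h1.2.2 r2 h2.1 h2.2.1) (h2.2.2 r1 h1.1 h1.2.1)

theorem mod_one_iff (n i : Int) (hi : 2 ≤ i) :
    PySem.Int.mod n i = 1 ↔ i ∣ (n - 1) := by
  rw [PySem.Int.mod_eq_emod_of_pos (by omega : (0:Int) < i)]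
  constructor
  · intro h
    exact ⟨n / i, by linarith [Int.emod_add_mul_ediv n i]⟩
  · rintro ⟨k, hk⟩
    have : n = 1 + i * k := by omega
    rw [this, Int.add_mul_emod_self_left]
    exact Int.emod_eq_of_lt (by norm_num) (by omega)


theorem spfAux_isLD (m i : Int) (hm : 2 ≤ m) (hi : 2 ≤ i)
    (hno : ∀ d, 2 ≤ d → d < i → ¬ d ∣ m) : IsLD m (spfAux m i) := by
  rw [spfAux]
  split_ifs with h1 h2
  · -- i * i ≤ m and i ∣ m : result i
    have hdvd : i ∣ m := (PySem.Int.mod_eq_zero_iff_dvd m i).1 (by simpa using h2)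
    refine ⟨hi, hdvd, fun d hd2 hdd => ?_⟩
    by_contra hlt
    exact hno d hd2 (by omega) hdd
  · -- i ∤ m : recurse
    exact spfAux_isLD m (i + 1) hm (by omega) (fun d hd2 hdlt hdd => by
      rcases lt_or_eq_of_le (by omega : d ≤ i) with h | h
      · exact hno d hd2 h hdd
      · exact h2 (by simp [(PySem.Int.mod_eq_zero_iff_dvd m i).2 (h ▸ hdd)]))
  · -- i * i > m : m has no divisor in [2, i), hence none in [2, m): result m
    refine ⟨hm, dvd_refl m, fun d hd2 hdd => ?_⟩
    by_contra hdm
    push Not at hdm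
    obtain ⟨e, he⟩ := id hdd
    have he2 : 2 ≤ e := by nlinarith
    have hde : d < i ∨ e < i := by by_contra hc; push Not at hc; nlinarith
    rcases hde with h | h
    · exact hno d hd2 h hdd
    · exact hno e he2 h ⟨d, by linarith [mul_comm d e]⟩
termination_by (m + 1 - i).toNat
decreasing_by
  have hii : i ≤ i * i := by nlinarith [mul_self_nonneg (i - 1)]
  omega

theorem mem_xlist (n i : Int) :
    i ∈ (PySem.List.pyRange 1 n 1).filter (fun i => PySem.Int.mod n i == 1) ↔
      2 ≤ i ∧ i < n ∧ i ∣ (n - 1) := by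
  simp only [List.mem_filter, PySem.List.mem_pyRange_one, beq_iff_eq]
  constructor
  · rintro ⟨⟨h1, h2⟩, h3⟩
    have hi2 : 2 ≤ i := by
      by_contra h
      have : i = 1 := by omega
      rw [this] at h3
      simp [PySem.Int.mod] at h3
    exact ⟨hi2, h2, (mod_one_iff n i hi2).1 h3⟩
  · rintro ⟨h1, h2, h3⟩
    exact ⟨⟨by omega, h2⟩, (mod_one_iff n i h1).2 h3⟩

theorem solution_isLD (n : Int) (hn : 3 ≤ n) : IsLD (n - 1) (solution n) := by
  unfold solution
  rw [PySem.List.foldl_append_if_eq_filter]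
  simp only [List.nil_append]
  set xlist := (PySem.List.pyRange 1 n 1).filter (fun i => PySem.Int.mod n i == 1) with hx
  have hmem : (n - 1) ∈ xlist := by
    rw [hx, mem_xlist]; exact ⟨by omega, by omega, dvd_refl _⟩
  obtain ⟨r, hr⟩ : ∃ r, PySem.List.min? xlist (fun x => x) = some r := by
    cases h : PySem.List.min? xlist (fun x => x) with
    | none => rw [PySem.List.min?_eq_none_iff] at h; simp [h] at hmem
    | some r => exact ⟨r, rfl⟩
  rw [hr]
  have hrmem := PySem.List.min?_mem hr
  rw [hx, mem_xlist] at hrmem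
  refine ⟨hrmem.1, hrmem.2.2, fun d hd2 hdd => ?_⟩
  have hdle : d ≤ n - 1 := Int.le_of_dvd (by omega) hdd
  have hdmem : d ∈ xlist := by
    rcases eq_or_lt_of_le hdle with h | h
    · rw [h]; exact hmem
    · rw [hx, mem_xlist]; exact ⟨hd2, by omega, hdd⟩
  exact PySem.List.min?_isMin hr d hdmem

-- ===== VERDICT (by name: the statement is the Claim_ definition above) =====
theorem solution_spec : Claim_equal_solution := by
  intro n _ hpre
  unfold Pre_solution at hpre
  unfold Spec_solution solution_alt
  exact IsLD_unique (solution_isLD n hpre)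
    (spfAux_isLD (n - 1) 2 (by omega) (by omega) (fun d h1 h2 => absurd h2 (by omega)))
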